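-- pv_equiv track=rewrite | github.com/Casey0903/lyst-index-equity-backtest | backtest/entry_strategy_test.py | find_2q_on_list
-- ===== SOURCE A (Python) =====
-- UNRANKED = 21
--
-- def find_2q_on_list(brands, brand_data, quarters):
--     """Quarter when any brand has been on list 2 consecutive quarters."""
--     for i in range(1, len(quarters)):
--         q, prev = quarters[i], quarters[i - 1]
--         for brand in brands:
--             bd = brand_data.get(brand, {})
--             if bd.get(q, UNRANKED) < UNRANKED and bd.get(prev, UNRANKED) < UNRANKED:
--                 return q
--     return None
-- ===== SOURCE B (Python) =====
-- UNRANKED = 21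
--
-- def find_2q_on_list(brands, brand_data, quarters):
--     """Quarter when any brand has been on list 2 consecutive quarters."""
--     # Precompute, per quarter, the set of brands ranked in it; then scan
--     # consecutive quarter pairs for a non-empty intersection.
--     ranked = {q: {b for b in brands
--                   if brand_data.get(b, {}).get(q, UNRANKED) < UNRANKED}
--               for q in quarters}
--     for prev, q in zip(quarters, quarters[1:]):
--         if ranked[prev] & ranked[q]:
--             return q
--     return None
-- ===== Notes on version B (the rewrite author's own statement) =====
-- stated objective: alternative
-- what changed: B first builds a quarter->set-of-ranked-brands index in one pass, then scans consecutive quarter pairs for a non-empty set intersection, instead of A's nested index loop re-querying brand_data per brand per pair.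
import Mathlib
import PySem

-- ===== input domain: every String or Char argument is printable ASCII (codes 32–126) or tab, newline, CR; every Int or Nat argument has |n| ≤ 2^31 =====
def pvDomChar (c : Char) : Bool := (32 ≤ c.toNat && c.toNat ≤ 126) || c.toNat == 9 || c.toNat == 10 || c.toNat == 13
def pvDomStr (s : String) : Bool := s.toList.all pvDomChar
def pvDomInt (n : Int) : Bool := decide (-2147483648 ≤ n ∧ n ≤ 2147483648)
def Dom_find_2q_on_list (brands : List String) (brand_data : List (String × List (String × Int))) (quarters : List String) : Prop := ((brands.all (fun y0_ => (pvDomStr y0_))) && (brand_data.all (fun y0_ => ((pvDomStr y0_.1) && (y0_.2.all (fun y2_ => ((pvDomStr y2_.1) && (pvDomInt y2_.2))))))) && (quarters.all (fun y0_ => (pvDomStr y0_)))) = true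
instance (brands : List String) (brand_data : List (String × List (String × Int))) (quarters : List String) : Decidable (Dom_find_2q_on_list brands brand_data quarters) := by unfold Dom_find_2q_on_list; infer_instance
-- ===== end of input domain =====

-- B builds a quarter -> ranked-brand-set index once, then scans consecutive quarter
-- pairs for a non-empty intersection, instead of A's nested per-pair brand loop (objective: alternative).

-- ===== PORT A =====
-- inner 'for brand in brands: … return q'
def aInner (brand_data : List (String × List (String × Int))) (q prev : String) :
    List String → Option String
  | [] => none
  | brand :: rest =>
    let bd := (PySem.Dict.mk brand_data).getD brand []
    if (PySem.Dict.mk bd).getD q 21 < 21 ∧ (PySem.Dict.mk bd).getD prev 21 < 21 then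
      some q
    else aInner brand_data q prev rest

-- outer 'for i in range(1, len(quarters))'
def aLoop (brands : List String) (brand_data : List (String × List (String × Int)))
    (quarters : List String) : List Int → Option String
  | [] => none
  | i :: rest =>
    match PySem.List.pyGet? quarters i, PySem.List.pyGet? quarters (i - 1) with
    | some q, some prev =>
      match aInner brand_data q prev brands with
      | some r => some r
      | none => aLoop brands brand_data quarters rest
    | _, _ => none

def find_2q_on_list (brands : List String) (brand_data : List (String × List (String × Int))) (quarters : List String) : Option String :=
  aLoop brands brand_data quarters (PySem.List.pyRange 1 (quarters.length : Int) 1)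

-- ===== PORT B =====
-- ranked = {q: {b for b in brands if brand_data.get(b, {}).get(q, UNRANKED) < UNRANKED} for q in quarters}
def bRanked (brands : List String) (brand_data : List (String × List (String × Int)))
    (quarters : List String) : PySem.Dict String (PySem.Set String) :=
  quarters.foldl
    (fun d q => d.insert q (PySem.Set.ofList (brands.filter (fun b =>
      decide ((PySem.Dict.mk ((PySem.Dict.mk brand_data).getD b [])).getD q 21 < 21)))))
    PySem.Dict.empty

-- 'for prev, q in zip(quarters, quarters[1:]): if ranked[prev] & ranked[q]: return q'
-- (ranked[x] lookup always succeeds since x ∈ quarters; getD's default is unreachable)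
def bScan (ranked : PySem.Dict String (PySem.Set String)) : List (String × String) → Option String
  | [] => none
  | (prev, q) :: rest =>
    if (PySem.Set.inter (ranked.getD prev []) (ranked.getD q [])).isEmpty then bScan ranked rest
    else some q

def find_2q_on_list_alt (brands : List String) (brand_data : List (String × List (String × Int))) (quarters : List String) : Option String :=
  bScan (bRanked brands brand_data quarters) (quarters.zip (quarters.drop 1))

-- ===== PRECONDITION & SPEC =====
def Spec_find_2q_on_list (brands : List String) (brand_data : List (String × List (String × Int))) (quarters : List String) (out : Option String) : Prop := out = find_2q_on_list_alt brands brand_data quarters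
instance (brands : List String) (brand_data : List (String × List (String × Int))) (quarters : List String) (out : Option String) : Decidable (Spec_find_2q_on_list brands brand_data quarters out) := by unfold Spec_find_2q_on_list; infer_instance

-- ===== CLAIM (what is proved, stated in full; the proofs are below) =====
def Claim_equal_find_2q_on_list : Prop := ∀ (brands : List String) (brand_data : List (String × List (String × Int))) (quarters : List String), Dom_find_2q_on_list brands brand_data quarters → Spec_find_2q_on_list brands brand_data quarters (find_2q_on_list brands brand_data quarters)

-- ===== LEMMAS AND PROOFS =====

-- the "brand b is ranked in quarter q" test, shared by the proofs
def rankedTest (brand_data : List (String × List (String × Int))) (q b : String) : Bool :=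
  decide ((PySem.Dict.mk ((PySem.Dict.mk brand_data).getD b [])).getD q 21 < 21)

def setFor (brands : List String) (brand_data : List (String × List (String × Int)))
    (q : String) : PySem.Set String :=
  PySem.Set.ofList (brands.filter (rankedTest brand_data q))

theorem getD_foldl_not_mem (brands : List String)
    (brand_data : List (String × List (String × Int))) (l : List String)
    (d : PySem.Dict String (PySem.Set String)) (q : String) (h : q ∉ l) :
    (l.foldl (fun d q => d.insert q (setFor brands brand_data q)) d).getD q [] =
      d.getD q [] := by
  induction l generalizing d with
  | nil => rfl
  | cons a t ih =>
    simp only [List.mem_cons, not_or] at h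
    simp only [List.foldl_cons, ih _ h.2, PySem.Dict.getD_insert, if_neg h.1]

theorem getD_bRanked (brands : List String)
    (brand_data : List (String × List (String × Int))) (quarters : List String)
    (q : String) (h : q ∈ quarters) :
    (bRanked brands brand_data quarters).getD q [] = setFor brands brand_data q := by
  have main : ∀ (l : List String) (d : PySem.Dict String (PySem.Set String)), q ∈ l →
      (l.foldl (fun d q => d.insert q (setFor brands brand_data q)) d).getD q [] =
        setFor brands brand_data q := by
    intro l
    induction l with
    | nil => intro _ h; exact absurd h (List.not_mem_nil)
    | cons a t ih =>
      intro d hm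
      by_cases ht : q ∈ t
      · simpa using ih _ ht
      · have ha : q = a := (List.mem_cons.1 hm).resolve_right ht
        subst ha
        simp only [List.foldl_cons, getD_foldl_not_mem brands brand_data t _ q ht,
          PySem.Dict.getD_insert_self]
  have : bRanked brands brand_data quarters =
      quarters.foldl (fun d q => d.insert q (setFor brands brand_data q)) PySem.Dict.empty := rfl
  rw [this]; exact main quarters _ h

theorem aInner_eq (brand_data : List (String × List (String × Int))) (q prev : String)
    (brands : List String) :
    aInner brand_data q prev brands =
      (if brands.any (fun b => rankedTest brand_data q b && rankedTest brand_data prev b)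
       then some q else none) := by
  induction brands with
  | nil => rfl
  | cons b t ih =>
    simp only [aInner, rankedTest, List.any_cons, ih]
    by_cases h1 : (PySem.Dict.mk ((PySem.Dict.mk brand_data).getD b [])).getD q 21 < 21 <;>
      by_cases h2 : (PySem.Dict.mk ((PySem.Dict.mk brand_data).getD b [])).getD prev 21 < 21 <;>
        simp [h1, h2]

theorem inter_isEmpty (brands : List String)
    (brand_data : List (String × List (String × Int))) (prev q : String) :
    (PySem.Set.inter (setFor brands brand_data prev) (setFor brands brand_data q)).isEmpty =
      !(brands.any (fun b => rankedTest brand_data q b && rankedTest brand_data prev b)) := by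
  rcases h : (PySem.Set.inter (setFor brands brand_data prev) (setFor brands brand_data q)).isEmpty
  · have ⟨x, hx⟩ : ∃ x, x ∈ PySem.Set.inter (setFor brands brand_data prev)
        (setFor brands brand_data q) := by
      rcases he : PySem.Set.inter (setFor brands brand_data prev) (setFor brands brand_data q) with _ | ⟨y, t⟩
      · rw [he] at h; simp at h
      · exact ⟨y, by simp⟩
    rw [PySem.Set.mem_inter] at hx
    simp only [setFor, PySem.Set.mem_ofList, List.mem_filter] at hx
    have : brands.any (fun b => rankedTest brand_data q b && rankedTest brand_data prev b) = true := by
      rw [List.any_eq_true]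
      exact ⟨x, hx.1.1, by simp [hx.1.2, hx.2.2]⟩
    simp [this]
  · rw [List.isEmpty_iff] at h
    have : ¬ brands.any (fun b => rankedTest brand_data q b && rankedTest brand_data prev b) = true := by
      rw [List.any_eq_true]
      rintro ⟨b, hb, hcond⟩
      simp only [Bool.and_eq_true] at hcond
      have : b ∈ PySem.Set.inter (setFor brands brand_data prev) (setFor brands brand_data q) := by
        rw [PySem.Set.mem_inter]
        constructor <;> simp [setFor, PySem.Set.mem_ofList, List.mem_filter, hb, hcond.1, hcond.2]
      rw [h] at this
      exact absurd this (List.not_mem_nil)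
    simp [this]

theorem loop_align (brands : List String)
    (brand_data : List (String × List (String × Int))) (quarters : List String) :
    ∀ (m k : Nat), quarters.length ≤ k + m →
      aLoop brands brand_data quarters (PySem.List.pyRange ((k : Int) + 1) (quarters.length : Int) 1) =
        bScan (bRanked brands brand_data quarters)
          ((quarters.drop k).zip (quarters.drop (k + 1))) := by
  intro m
  induction m with
  | zero =>
    intro k hk
    simp only [Nat.add_zero] at hk
    rw [PySem.List.pyRange_one_eq_nil (by exact_mod_cast Nat.le_succ_of_le hk),
      List.drop_eq_nil_of_le hk]
    rfl
  | succ m ih =>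
    intro k hk
    by_cases hlt : k + 1 < quarters.length
    · rw [PySem.List.pyRange_one_cons (by exact_mod_cast hlt)]
      have hk1 : k < quarters.length := Nat.lt_of_succ_lt hlt
      have hq : PySem.List.pyGet? quarters ((k : Int) + 1) = some quarters[k + 1] := by
        rw [show ((k : Int) + 1) = ((k + 1 : Nat) : Int) by push_cast; ring,
          PySem.List.pyGet?_natCast, List.getElem?_eq_getElem hlt]
      have hp : PySem.List.pyGet? quarters ((k : Int) + 1 - 1) = some quarters[k] := by
        rw [show ((k : Int) + 1 - 1) = ((k : Nat) : Int) by ring,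
          PySem.List.pyGet?_natCast, List.getElem?_eq_getElem hk1]
      rw [List.drop_eq_getElem_cons hk1, List.drop_eq_getElem_cons hlt]
      simp only [aLoop, hq, hp, List.zip_cons_cons, bScan,
        getD_bRanked brands brand_data quarters _ (List.getElem_mem hk1),
        getD_bRanked brands brand_data quarters _ (List.getElem_mem hlt),
        aInner_eq, inter_isEmpty]
      rcases hany : brands.any (fun b => rankedTest brand_data quarters[k + 1] b &&
          rankedTest brand_data quarters[k] b)
      · have := ih (k + 1) (by omega)
        rw [show (((k + 1 : Nat) : Int) + 1) = ((k : Int) + 1 + 1) by push_cast; ring,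
          List.drop_eq_getElem_cons hlt] at this
        simpa using this
      · simp
    · rw [PySem.List.pyRange_one_eq_nil (by exact_mod_cast Nat.not_lt.1 hlt),
        List.drop_eq_nil_of_le (Nat.not_lt.1 hlt), List.zip_nil_right]
      rfl

-- ===== VERDICT (by name: the statement is the Claim_ definition above) =====
theorem find_2q_on_list_spec : Claim_equal_find_2q_on_list := by
  intro brands brand_data quarters _
  show find_2q_on_list brands brand_data quarters = find_2q_on_list_alt brands brand_data quarters
  have := loop_align brands brand_data quarters quarters.length 0 (by omega)
  simpa [find_2q_on_list, find_2q_on_list_alt] using this
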